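-- pv_equiv track=rewrite | github.com/Zazmuz/kattis | open/digitsum/digitsum.py | rec
-- ===== SOURCE A (Python) =====
-- dp = {}
--
-- ss = lambda x: sum(int(i) for i in str(x))
--
-- def rec(n):
--     if n in dp:
--         return dp[n]
--     if n <= 0:
--         return 0
--     ret = 0
--     if n % 10 == 0:
--         ret += 10 * rec(n // 10)
--         ret += 45 * (n // 10)
--     else:
--         ret += rec(n - 1)
--         ret += ss(n - 1)
--     dp[n] = ret
--     return ret
-- ===== SOURCE B (Python) =====
-- def rec(n):
--     # digit sum of 0..n-1 via the place-value closed form, no memo dict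
--     m = n - 1
--     total = 0
--     p = 1
--     while p <= m:
--         higher = m // (p * 10)
--         cur = (m // p) % 10
--         low = m % p
--         total += higher * 45 * p + cur * (cur - 1) // 2 * p + cur * (low + 1)
--         p *= 10
--     return total
-- ===== Notes on version B (the rewrite author's own statement) =====
-- stated objective: simpler
-- what changed: Replaces the memoized recursion (divide-by-10 / subtract-1 cases plus a per-number string digit sum) with a single non-recursive loop over decimal place values using the classic closed-form contribution per position, needing no memo dict and no string conversion.
import Mathlib
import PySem

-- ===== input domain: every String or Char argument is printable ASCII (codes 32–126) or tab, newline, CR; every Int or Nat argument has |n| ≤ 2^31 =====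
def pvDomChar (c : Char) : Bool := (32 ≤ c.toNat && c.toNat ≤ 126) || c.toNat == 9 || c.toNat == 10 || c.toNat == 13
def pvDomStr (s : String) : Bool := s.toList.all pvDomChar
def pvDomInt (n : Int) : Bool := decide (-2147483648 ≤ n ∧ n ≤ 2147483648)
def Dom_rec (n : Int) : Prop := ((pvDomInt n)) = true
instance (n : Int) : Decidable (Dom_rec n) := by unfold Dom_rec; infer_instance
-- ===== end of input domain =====

-- B replaces A's memoized recursion (with string digit sums) by a non-recursive
-- place-value closed-form loop: simpler, no memo dict (A's module-level dp cache is a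
-- pure memo and is dropped in the port; return values are unaffected).


-- ===== PORT A =====
-- ss = lambda x: sum(int(i) for i in str(x)); int(i) parses the single character i;
-- the `.getD 0` default is never reached: rec only calls ss on nonnegative arguments,
-- all of whose characters are decimal digits, which parse.
def ssA (x : Int) : Int :=
  ((PySem.Int.toChars x).map (fun c => (PySem.Int.ofChars? [c]).getD 0)).sum

-- literal port of A's rec; the module-level dict dp only memoizes this pure
-- recursion (it never changes any return value), so it is dropped.
def rec (n : Int) : Int :=
  if _h0 : n ≤ 0 then 0
  else if PySem.Int.mod n 10 = 0 then
    10 * rec (PySem.Int.floordiv n 10) + 45 * PySem.Int.floordiv n 10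
  else
    rec (n - 1) + ssA (n - 1)
termination_by n.toNat
decreasing_by
  · rw [PySem.Int.floordiv_eq_ediv_of_pos (by omega)]; omega
  · omega

-- ===== PORT B =====
-- the while loop of Source B: state (p, total), condition p <= m, locals higher/cur/low
def recLoop (m p total : Int) (hp : 0 < p) : Int :=
  if _h : p ≤ m then
    let higher := PySem.Int.floordiv m (p * 10)
    let cur := PySem.Int.mod (PySem.Int.floordiv m p) 10
    let low := PySem.Int.mod m p
    recLoop m (p * 10)
      (total + (higher * 45 * p + PySem.Int.floordiv (cur * (cur - 1)) 2 * p + cur * (low + 1)))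
      (by omega)
  else total
termination_by (m + 1 - p).toNat
decreasing_by omega

def rec_alt (n : Int) : Int := recLoop (n - 1) 1 0 (by omega)

-- ===== PRECONDITION & SPEC =====
def Spec_rec (n : Int) (out : Int) : Prop := out = rec_alt n
instance (n : Int) (out : Int) : Decidable (Spec_rec n out) := by unfold Spec_rec; infer_instance

-- ===== CLAIM (what is proved, stated in full; the proofs are below) =====
def Claim_equal_rec : Prop := ∀ (n : Int), Dom_rec n → Spec_rec n (rec n)

-- ===== LEMMAS AND PROOFS =====

-- digit sum of a natural number
def S (n : Nat) : Nat := (Nat.digits 10 n).sum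
-- G m = digit sum of 0, 1, …, m-1 together (the value rec computes at input m)
def G (m : Nat) : Nat := ∑ i ∈ Finset.range m, S i
-- tail digit sum used to analyse recLoop: digits of m at place values ≥ p
def SI (m p : Int) (hp : 0 < p) : Int :=
  if _h : p ≤ m then PySem.Int.mod (PySem.Int.floordiv m p) 10 + SI m (p * 10) (by omega)
  else 0
termination_by (m + 1 - p).toNat
decreasing_by omega

theorem S_div_mod (n : Nat) : S n = n % 10 + S (n / 10) := by
  rcases Nat.eq_zero_or_pos n with h | h
  · simp [S, h]
  · unfold S; rw [Nat.digits_def' (by norm_num) h]; simp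

theorem S_ten_add (q r : Nat) (hr : r < 10) : S (10 * q + r) = S q + r := by
  have := S_div_mod (10 * q + r)
  have h1 : (10 * q + r) % 10 = r := by omega
  have h2 : (10 * q + r) / 10 = q := by omega
  rw [h1, h2] at this; omega

theorem G_succ (m : Nat) : G (m + 1) = G m + S m := by
  simp [G, Finset.sum_range_succ]

theorem G_step (q r : Nat) (hr : r ≤ 9) :
    G (10 * q + r + 1) = G (10 * q) + (r + 1) * S q + r * (r + 1) / 2 := by
  induction r with
  | zero =>
    simp [G_succ]
    have := S_ten_add q 0 (by norm_num); simpa using this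
  | succ k ih =>
    have hk : k ≤ 9 := by omega
    have : 10 * q + (k + 1) + 1 = (10 * q + k + 1) + 1 := by ring
    rw [this, G_succ, ih hk]
    have hS : S (10 * q + k + 1) = S q + (k + 1) := by
      have e : 10 * q + k + 1 = 10 * q + (k + 1) := by ring
      rw [e, S_ten_add q (k+1) (by omega)]
    have e1 : (k+1) * (k+2) / 2 = k * (k+1) / 2 + (k+1) := by
      have h2 : 2 ∣ k * (k+1) := (Nat.even_mul_succ_self k).two_dvd
      have h3 : (k+1) * (k+2) = k * (k+1) + 2 * (k+1) := by ring
      omega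
    have e2 : (k + 1 + 1) * S q = (k+1) * S q + S q := by ring
    have e3 : (k + 1) * (k + 1 + 1) = (k+1) * (k+2) := by ring
    rw [hS, e2, e3, e1]
    omega

theorem G_ten (q : Nat) : G (10 * q) = 10 * G q + 45 * q := by
  induction q with
  | zero => simp [G]
  | succ k ih =>
    have : 10 * (k + 1) = 10 * k + 9 + 1 := by ring
    rw [this, G_step k 9 (le_refl 9), ih, G_succ]
    ring_nf

theorem conv_digitChar (d : Nat) (hd : d < 10) :
    (PySem.Int.ofChars? [Nat.digitChar d]).getD 0 = (d : Int) := by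
  interval_cases d <;> decide

theorem core_sum : ∀ (f n : Nat) (l : List Char), n < f →
    ((Nat.toDigitsCore 10 f n l).map (fun c => (PySem.Int.ofChars? [c]).getD 0)).sum
      = (S n : Int) + ((l.map (fun c => (PySem.Int.ofChars? [c]).getD 0)).sum) := by
  intro f
  induction f with
  | zero => intro n l h; omega
  | succ g ih =>
    intro n l h
    rw [Nat.toDigitsCore]
    by_cases h0 : n / 10 = 0
    · simp only [h0]
      have hS : S n = n % 10 := by have := S_div_mod n; simp [S, h0] at this ⊢; omega
      simp [conv_digitChar (n % 10) (by omega), hS]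
    · simp only [if_neg h0]
      have hlt : n / 10 < g := by omega
      rw [ih (n / 10) _ hlt]
      simp [conv_digitChar (n % 10) (by omega)]
      have := S_div_mod n
      push_cast [this]
      ring

theorem ssA_natCast (m : Nat) : ssA (m : Int) = (S m : Int) := by
  unfold ssA PySem.Int.toChars
  rw [if_neg (by omega : ¬ ((m : Int) < 0))]
  simp only [Int.toNat_natCast]
  unfold Nat.toDigits
  rw [core_sum (m + 1) m [] (by omega)]
  simp

theorem rec_nonpos (n : Int) (h : n ≤ 0) : rec n = 0 := by
  rw [rec]; simp [h]

theorem rec_natCast_k : ∀ (k m : Nat), m ≤ k → rec (m : Int) = (G m : Int) := by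
  intro k
  induction k with
  | zero => intro m hm; have : m = 0 := by omega
            subst this; simp [rec_nonpos 0 le_rfl, G]
  | succ g ih =>
    intro m hm
    rcases Nat.eq_zero_or_pos m with h0 | h0
    · subst h0; simp [rec_nonpos 0 le_rfl, G]
    · rw [rec, dif_neg (by omega : ¬ ((m : Int) ≤ 0))]
      rw [PySem.Int.mod_eq_emod_of_pos (by omega), PySem.Int.floordiv_eq_ediv_of_pos (by omega)]
      by_cases hd : (m : Int) % 10 = 0
      · rw [if_pos hd]
        have hq : (m : Int) / 10 = ((m / 10 : Nat) : Int) := by omega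
        have hm10 : m = 10 * (m / 10) := by omega
        rw [hq, ih (m / 10) (by omega)]
        conv_rhs => rw [hm10]
        rw [G_ten]
        push_cast; ring
      · rw [if_neg hd]
        have he : (m : Int) - 1 = ((m - 1 : Nat) : Int) := by omega
        rw [he, ih (m - 1) (by omega), ssA_natCast]
        have : m = (m - 1) + 1 := by omega
        conv_rhs => rw [this, G_succ]
        push_cast; ring

theorem rec_natCast (m : Nat) : rec (m : Int) = (G m : Int) := rec_natCast_k m m le_rfl

theorem recLoop_stop (m p t : Int) (hp : 0 < p) (h : ¬ p ≤ m) : recLoop m p t hp = t := by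
  rw [recLoop]; simp [h]

theorem SI_stop (m p : Int) (hp : 0 < p) (h : ¬ p ≤ m) : SI m p hp = 0 := by
  rw [SI]; simp [h]

theorem divmod_unique (a b X Y : Int) (hb : 0 < b) (hY0 : 0 ≤ Y) (hY : Y < b)
    (h : a = b * X + Y) : a / b = X ∧ a % b = Y := by
  have hd : a / b = X := by
    rw [h, add_comm, Int.add_mul_ediv_left _ _ (by omega : b ≠ 0),
      Int.ediv_eq_zero_of_lt hY0 hY, zero_add]
  refine ⟨hd, ?_⟩
  rw [Int.emod_def, hd]; omega

theorem recLoop_acc_k : ∀ (k : Nat) (m p t : Int) (hp : 0 < p), (m + 1 - p).toNat ≤ k →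
    recLoop m p t hp = t + recLoop m p 0 hp := by
  intro k
  induction k with
  | zero =>
    intro m p t hp hk
    have h : ¬ (p ≤ m) := by omega
    rw [recLoop_stop _ _ _ _ h, recLoop_stop _ _ _ _ h]; ring
  | succ g ih =>
    intro m p t hp hk
    by_cases h : p ≤ m
    · rw [recLoop]; conv_rhs => rw [recLoop]
      simp only [dif_pos h]
      have key : ∀ t', recLoop m (p * 10) t' (by omega) = t' + recLoop m (p * 10) 0 (by omega) :=
        fun t' => ih m (p * 10) t' (by omega) (by omega)
      conv_rhs => rw [key]
      conv_lhs => rw [key]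
      ring
    · rw [recLoop_stop _ _ _ _ h, recLoop_stop _ _ _ _ h]; ring

theorem recLoop_acc (m p t : Int) (hp : 0 < p) :
    recLoop m p t hp = t + recLoop m p 0 hp :=
  recLoop_acc_k (m + 1 - p).toNat m p t hp le_rfl

theorem recLoop_shift_k : ∀ (k : Nat) (q r p : Int), 0 ≤ q → 0 ≤ r → r < 10 →
    ∀ (hp : 0 < p), (q + 1 - p).toNat ≤ k →
    recLoop (10 * q + r) (p * 10) 0 (by omega) =
      10 * recLoop q p 0 hp + (r - 9) * SI q p hp := by
  intro k
  induction k with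
  | zero =>
    intro q r p hq hr0 hr hp hk
    have hnot : ¬ (p ≤ q) := by omega
    have hnot' : ¬ (p * 10 ≤ 10 * q + r) := by nlinarith
    rw [recLoop_stop _ _ _ _ hnot', recLoop_stop _ _ _ _ hnot, SI_stop _ _ _ hnot]; ring
  | succ g ih =>
    intro q r p hq hr0 hr hp hk
    by_cases h : p ≤ q
    · have h' : p * 10 ≤ 10 * q + r := by nlinarith
      have hde := Int.mul_ediv_add_emod q p
      have hw0 := Int.emod_nonneg q (show p ≠ 0 by omega)
      have hw1 := Int.emod_lt_of_pos q (show 0 < p by omega)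
      have hde2 := Int.mul_ediv_add_emod q (p * 10)
      have hw20 := Int.emod_nonneg q (show p * 10 ≠ 0 by omega)
      have hw21 := Int.emod_lt_of_pos q (show 0 < p * 10 by omega)
      have e1 : (10 * q + r) / (p * 10) = q / p :=
        (divmod_unique _ _ (q / p) (10 * (q % p) + r) (by omega) (by omega) (by omega)
          (by linear_combination 10 * hde.symm)).1
      have e2 : (10 * q + r) % (p * 10) = 10 * (q % p) + r :=
        (divmod_unique _ _ (q / p) (10 * (q % p) + r) (by omega) (by omega) (by omega)
          (by linear_combination 10 * hde.symm)).2
      have e3 : (10 * q + r) / (p * 10 * 10) = q / (p * 10) :=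
        (divmod_unique _ _ (q / (p * 10)) (10 * (q % (p * 10)) + r) (by omega) (by omega)
          (by omega) (by linear_combination 10 * hde2.symm)).1
      rw [recLoop]; conv_rhs => rw [recLoop, SI]
      simp only [dif_pos h, dif_pos h']
      conv_lhs => rw [recLoop_acc]
      conv_rhs => rw [recLoop_acc]
      rw [ih q r (p * 10) hq hr0 hr (by omega) (by omega)]
      simp only [PySem.Int.floordiv_eq_ediv_of_pos (show (0:Int) < p * 10 * 10 by omega),
        PySem.Int.floordiv_eq_ediv_of_pos (show (0:Int) < p * 10 by omega),
        PySem.Int.floordiv_eq_ediv_of_pos (show (0:Int) < p by omega),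
        PySem.Int.mod_eq_emod_of_pos (show (0:Int) < 10 by omega),
        PySem.Int.mod_eq_emod_of_pos (show (0:Int) < p * 10 by omega),
        PySem.Int.mod_eq_emod_of_pos (show (0:Int) < p by omega)]
      rw [e1, e2, e3]
      ring
    · have h' : ¬ (p * 10 ≤ 10 * q + r) := by nlinarith
      rw [recLoop_stop _ _ _ _ h', recLoop_stop _ _ _ _ h, SI_stop _ _ _ h]; ring

theorem SI_eq_k : ∀ (k : Nat) (q p : Int), 0 ≤ q → ∀ (hp : 0 < p), (q + 1 - p).toNat ≤ k →
    SI q p hp = (S ((q / p).toNat) : Int) := by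
  intro k
  induction k with
  | zero =>
    intro q p hq hp hk
    have h : ¬ (p ≤ q) := by omega
    rw [SI_stop _ _ _ h, Int.ediv_eq_zero_of_lt hq (by omega)]
    simp [S]
  | succ g ih =>
    intro q p hq hp hk
    by_cases h : p ≤ q
    · rw [SI]; simp only [dif_pos h]
      rw [ih q (p * 10) hq (by omega) (by omega)]
      have e : q / (p * 10) = (q / p) / 10 := by
        rw [← Int.ediv_ediv_of_nonneg (by omega : (0:Int) ≤ p)]
      rw [e]
      have hqp0 : 0 ≤ q / p := Int.ediv_nonneg hq (by omega)
      rw [PySem.Int.floordiv_eq_ediv_of_pos (show (0:Int) < p by omega),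
        PySem.Int.mod_eq_emod_of_pos (show (0:Int) < 10 by omega)]
      have hsd := S_div_mod ((q / p).toNat)
      have e2 : ((q / p) / 10).toNat = (q / p).toNat / 10 := by omega
      have e3 : (q / p) % 10 = ((q / p).toNat % 10 : Nat) := by omega
      rw [e2, e3, hsd]
      push_cast; ring
    · rw [SI_stop _ _ _ h, Int.ediv_eq_zero_of_lt hq (by omega)]
      simp [S]

theorem SI_one (q : Int) (hq : 0 ≤ q) (hp : (0:Int) < 1) : SI q 1 hp = (S q.toNat : Int) := by
  rw [SI_eq_k (q + 1 - 1).toNat q 1 hq hp le_rfl, Int.ediv_one]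

theorem recLoop_main_k : ∀ (k : Nat) (m : Int), 0 ≤ m → m.toNat ≤ k →
    ∀ (hp : (0:Int) < 1), recLoop m 1 0 hp = (G (m.toNat + 1) : Int) := by
  intro k
  induction k with
  | zero =>
    intro m hm hk hp
    have h0 : m = 0 := by omega
    subst h0
    rw [recLoop_stop _ _ _ _ (by omega)]
    simp [G, S]
  | succ g ih =>
    intro m hm hk hp
    rcases eq_or_lt_of_le hm with h0 | h0
    · rw [← h0, recLoop_stop _ _ _ _ (by omega)]
      simp [G, S]
    · obtain ⟨q, r, hq0, hr0, hr9, hmqr⟩ :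
          ∃ q r : Int, 0 ≤ q ∧ 0 ≤ r ∧ r < 10 ∧ m = 10 * q + r :=
        ⟨m / 10, m % 10, by omega, by omega, by omega, by omega⟩
      subst hmqr
      rw [recLoop]
      simp only [dif_pos (show (1:Int) ≤ 10 * q + r by omega)]
      conv_lhs => rw [recLoop_acc]
      rw [recLoop_shift_k (q + 1 - 1).toNat q r 1 hq0 hr0 hr9 (by omega) le_rfl]
      rw [ih q hq0 (by omega) (by omega), SI_one q hq0 (by omega)]
      rw [PySem.Int.floordiv_eq_ediv_of_pos (show (0:Int) < 1 * 10 by omega),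
        PySem.Int.floordiv_eq_ediv_of_pos (show (0:Int) < 1 by omega),
        PySem.Int.mod_eq_emod_of_pos (show (0:Int) < 10 by omega),
        PySem.Int.mod_eq_emod_of_pos (show (0:Int) < 1 by omega)]
      rw [PySem.Int.floordiv_eq_ediv_of_pos (show (0:Int) < 2 by omega)]
      have ed : (10 * q + r) / (1 * 10) = q := by omega
      have ed1 : (10 * q + r) / 1 = 10 * q + r := Int.ediv_one _
      have em1 : (10 * q + r) % 1 = 0 := Int.emod_one _
      have em10 : (10 * q + r) % 10 = r := by omega
      rw [ed, ed1, em1, em10]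
      have eN : (10 * q + r).toNat + 1 = 10 * q.toNat + r.toNat + 1 := by omega
      rw [eN, G_step q.toNat r.toNat (by omega), G_ten, G_succ]
      have hq' : q = (q.toNat : Int) := by omega
      interval_cases r <;> push_cast <;> omega

-- ===== VERDICT (by name: the statement is the Claim_ definition above) =====
theorem rec_spec : Claim_equal_rec := by
  intro n _
  unfold Spec_rec rec_alt
  by_cases h : n ≤ 0
  · rw [rec_nonpos n h, recLoop_stop _ _ _ _ (by omega)]
  · have h1 : 0 ≤ n - 1 := by omega
    rw [recLoop_main_k (n - 1).toNat (n - 1) h1 le_rfl (by omega)]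
    have e : (n - 1).toNat + 1 = n.toNat := by omega
    have hn : n = ((n.toNat : Int)) := by omega
    rw [e]
    conv_lhs => rw [hn]
    rw [rec_natCast]
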